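-- pv_equiv track=rewrite | github.com/TreeWonTwoToFor/personal_projects | Python/Working/Banshee bot/mainv2.py | level_lookup
-- ===== SOURCE A (Python) =====
-- class variables:
--     ghost_list = ["Banshee", "Demon", "Deogen", "Goryo", "Hantu", "Jinn", "Mare", "Moroi", "Myling", "Obake", "Oni", "Onryo", "Phantom", "Poltergeist",
--     "Raiju", "Revenant", "Shade", "Spirit", "Thaye", "The Mimic", "The Twins", "Wraith", "Yokai", "Yurei"]
--     to_do_list = ["• Cursed object information", "• Make level command more robust",
--     "• Show level requirements per item", "• Sound Clips for parabolic microphone + walking speed",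
--     "• Lore command to talk about ghost history", "• Add tiers to the items in the level list"]
--     to_do_list.sort()
--     list_list = ['COMMAND LIST', 'help - gives more info on the command',
--     'list - shows all commands', 'wave - says hello',
--     'evidence - lists what ghost has which evidence', 'to-do - lists the current to-do list',
--     'map - link to the game maps', 'wiki - link to the game wiki',
--     "version - gives the version number", 'level - tells the level of an item',
--     'ghost - allows for a lookup for ghosts']
--     list_list.sort()
--     version = "v0.5 (live)"
--     evidence_list = ["EMF", "UV", "DOTs", "Ghost Orbs", "Ghost Writing", "Freezing", "Spirit Box"]
--     level_dictonary = {
--         "flashlight": [1, 19, 35],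
--         "emf": [1, 20, 52],
--         "uv": [1, 21, 56],
--         "book": [1, 23, 63],
--         "photo": [3, 25, 70],
--         "spirit-box": [1, 27, 54],
--         "dots": [1, 29, 60],
--         "microphone": [7, 31, 72],
--         "sound": [11, 32, 58],
--         "video": [1, 33, 61],
--         "tripod": [10, 34, 62],
--         "thermometer": [1, 36, 64],
--         "crucifix": [8, 37, 90],
--         "meds": [16, 39, 77],
--         "igniter": [12, 41, 57],
--         "incense": [14, 42, 85],
--         "salt": [9, 43, 68],
--         "motion": [1, 45, 74],
--         "firelight": [12, 47, 79],
--         "headgear": [13, 49, 82],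
--         "level_list": ["flashlight", "emf", "uv", "book", "photo", "spirit-box",
--             "dots", "microphone", "sound", "video", "tripod", "thermometer", "crucifix",
--             "meds", "igniter", "incense", "salt", "motion", "firelight", "headgear"]
--     }
--     map_list = ["Ridgeview Court", "Willow Street", "Edgeview Road", "Tanglewood Drive",
--                 "Bleasedale Farmhouse", "Brownstone High School", "Camp Woodwind", "Grafton Farmhouse",
--                 "Maple Lodge Campsite", "Point Hope", "Prison", "Sunny Meadowns Mental Institution"]
--
-- def level_lookup(rank):
--     lb_list = []
--     output_list = []
--     width = 5
--     if rank == 1: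
--         width = 9
--     if rank > 75:
--         rank = 75
--     for i in range(0,len(variables.level_dictonary)-1):
--         level_list = variables.level_dictonary.get("level_list")
--         item_ranks = variables.level_dictonary.get(level_list[i])
--         for j in range(0, len(item_ranks)):
--             if item_ranks[j] >= rank:
--                 lb_list.append((level_list[i],item_ranks[j]))
--     lb_list.sort(key=lambda x: x[1])
--     for k in range(0, width):
--         output_list.append(lb_list[k])
--     return level_clean(output_list)
--
-- def level_clean(unclean_item):
--     output_list = []
--     for i in range(0, len(unclean_item)):
--         output = str(unclean_item[i])
--         output = output.replace("(", "").replace(")", "").replace("'", "").replace(",", "")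
--         output = output.split()
--         new_output = output[1] + ": " + output[0]
--         output_list.append(new_output)
--     return output_list
-- ===== SOURCE B (Python) =====
-- class variables:
--     level_dictonary = {
--         "flashlight": [1, 19, 35],
--         "emf": [1, 20, 52],
--         "uv": [1, 21, 56],
--         "book": [1, 23, 63],
--         "photo": [3, 25, 70],
--         "spirit-box": [1, 27, 54],
--         "dots": [1, 29, 60],
--         "microphone": [7, 31, 72],
--         "sound": [11, 32, 58],
--         "video": [1, 33, 61],
--         "tripod": [10, 34, 62],
--         "thermometer": [1, 36, 64],
--         "crucifix": [8, 37, 90],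
--         "meds": [16, 39, 77],
--         "igniter": [12, 41, 57],
--         "incense": [14, 42, 85],
--         "salt": [9, 43, 68],
--         "motion": [1, 45, 74],
--         "firelight": [12, 47, 79],
--         "headgear": [13, 49, 82],
--         "level_list": ["flashlight", "emf", "uv", "book", "photo", "spirit-box",
--             "dots", "microphone", "sound", "video", "tripod", "thermometer", "crucifix",
--             "meds", "igniter", "incense", "salt", "motion", "firelight", "headgear"]
--     }
--
-- # Precomputed once: every (threshold, item) pair, stably sorted ascending by threshold.
-- _PAIRS = sorted(
--     [(t, item)
--      for item in variables.level_dictonary["level_list"]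
--      for t in variables.level_dictonary[item]],
--     key=lambda p: p[0])
--
-- def level_lookup(rank):
--     width = 9 if rank == 1 else 5
--     if rank > 75:
--         rank = 75
--     # binary search: first index whose threshold is >= rank
--     lo, hi = 0, len(_PAIRS)
--     while lo < hi:
--         mid = (lo + hi) // 2
--         if _PAIRS[mid][0] < rank:
--             lo = mid + 1
--         else:
--             hi = mid
--     return [f"{t}: {item}" for (t, item) in _PAIRS[lo:lo + width]]
-- ===== Notes on version B (the rewrite author's own statement) =====
-- stated objective: alternative
-- what changed: Instead of rebuilding, filtering and stably sorting the whole (item, threshold) pair table and re-parsing str() tuples on every call, B precomputes the flat threshold-sorted (threshold, item) table once at import, binary-searches the first threshold >= rank, slices the next `width` entries and formats them directly with an f-string; per-call work drops from O(n log n) to O(log n + width), though both are too fast to time on this small fixed table.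
import Mathlib
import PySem

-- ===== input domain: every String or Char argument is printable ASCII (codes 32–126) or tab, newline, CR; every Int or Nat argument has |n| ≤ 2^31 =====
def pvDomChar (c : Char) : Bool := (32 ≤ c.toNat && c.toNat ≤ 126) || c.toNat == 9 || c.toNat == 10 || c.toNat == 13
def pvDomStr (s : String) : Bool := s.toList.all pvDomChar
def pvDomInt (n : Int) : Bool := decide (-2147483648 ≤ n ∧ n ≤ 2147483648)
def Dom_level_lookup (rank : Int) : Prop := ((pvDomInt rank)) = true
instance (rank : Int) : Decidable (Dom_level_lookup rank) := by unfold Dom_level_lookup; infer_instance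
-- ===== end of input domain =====

set_option maxRecDepth 100000
set_option maxHeartbeats 10000000


-- B precomputes the flat (threshold, item) table sorted by threshold once and answers each
-- lookup by binary search + slice + direct formatting, instead of A's per-call filter,
-- sort and str()-replace/split dance (same return value on every input).

-- ===== PORT A =====
-- level_dictonary: heterogeneous Python dict split by hand into its 20 (item, thresholds) entries
-- and the "level_list" entry; exact (all keys distinct, lookups always hit).
def pvLevelData : PySem.Dict String (List Int) := PySem.Dict.ofList [
  ("flashlight", [1, 19, 35]), ("emf", [1, 20, 52]), ("uv", [1, 21, 56]),
  ("book", [1, 23, 63]), ("photo", [3, 25, 70]), ("spirit-box", [1, 27, 54]),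
  ("dots", [1, 29, 60]), ("microphone", [7, 31, 72]), ("sound", [11, 32, 58]),
  ("video", [1, 33, 61]), ("tripod", [10, 34, 62]), ("thermometer", [1, 36, 64]),
  ("crucifix", [8, 37, 90]), ("meds", [16, 39, 77]), ("igniter", [12, 41, 57]),
  ("incense", [14, 42, 85]), ("salt", [9, 43, 68]), ("motion", [1, 45, 74]),
  ("firelight", [12, 47, 79]), ("headgear", [13, 49, 82])]

def pvLevelListV : List String := ["flashlight", "emf", "uv", "book", "photo", "spirit-box",
  "dots", "microphone", "sound", "video", "tripod", "thermometer", "crucifix",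
  "meds", "igniter", "incense", "salt", "motion", "firelight", "headgear"]

-- port of level_clean; str((item, t)) is built by hand as "('item', t)" (exact: items are
-- plain ASCII words without quotes, parens, commas or spaces)
def level_clean (unclean_item : List (String × Int)) : List String :=
  (PySem.List.pyRange 0 (unclean_item.length : Int) 1).foldl (fun output_list i =>
    let p := PySem.List.pyGetD unclean_item i ("", 0)
    let output := "('" ++ p.1 ++ "', " ++ PySem.Int.toStr p.2 ++ ")"
    let output := PySem.Str.replace (PySem.Str.replace (PySem.Str.replace
                    (PySem.Str.replace output "(" "") ")" "") "'" "") "," ""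
    let output := PySem.Str.split₀ output
    let new_output := PySem.List.pyGetD output 1 "" ++ ": " ++ PySem.List.pyGetD output 0 ""
    output_list ++ [new_output]) []

def level_lookup (rank : Int) : List String :=
  let width : Int := 5
  let width := if rank = 1 then 9 else width
  let rank := if rank > 75 then 75 else rank
  -- len(level_dictonary) - 1 = 21 - 1
  let lb_list := (PySem.List.pyRange 0 (21 - 1) 1).foldl (fun lb_list i =>
    let level_list := pvLevelListV
    let item := PySem.List.pyGetD level_list i ""
    let item_ranks := (pvLevelData.get? item).getD []   -- .get(item): always present
    (PySem.List.pyRange 0 (item_ranks.length : Int) 1).foldl (fun lb_list j =>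
      if PySem.List.pyGetD item_ranks j 0 ≥ rank then
        lb_list ++ [(item, PySem.List.pyGetD item_ranks j 0)]
      else lb_list) lb_list) []
  let lb_list := PySem.List.sorted lb_list (fun x => x.2) false
  -- lb_list[k] is always in range: every rank (after the cap at 75) has at least `width` matches
  let output_list := (PySem.List.pyRange 0 width 1).foldl (fun output_list k =>
    output_list ++ [PySem.List.pyGetD lb_list k ("", 0)]) []
  level_clean output_list

-- ===== PORT B =====
def pvPairs : List (Int × String) :=
  PySem.List.sorted
    (pvLevelListV.flatMap (fun item =>
      ((pvLevelData.get? item).getD []).map (fun t => (t, item))))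
    (fun p => p.1) false

-- hand-rolled binary search loop of Source B; lo, hi stay within [0, len(_PAIRS)] so Nat is exact,
-- and fuel = len(_PAIRS) ≥ hi - lo bounds the loop (the while-loop shrinks hi - lo each step)
def pvBisect (rank : Int) (fuel lo hi : Nat) : Nat :=
  match fuel with
  | 0 => lo
  | f + 1 =>
    if lo < hi then
      let mid := (lo + hi) / 2
      if (PySem.List.pyGetD pvPairs (mid : Int) (0, "")).1 < rank then pvBisect rank f (mid + 1) hi
      else pvBisect rank f lo mid
    else lo

def level_lookup_alt (rank : Int) : List String :=
  let width : Int := if rank = 1 then 9 else 5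
  let rank := if rank > 75 then 75 else rank
  let lo := pvBisect rank pvPairs.length 0 pvPairs.length
  (PySem.List.slice pvPairs (some (lo : Int)) (some ((lo : Int) + width))).map
    (fun p => PySem.Int.toStr p.1 ++ ": " ++ p.2)



-- ===== PRECONDITION & SPEC =====
def Spec_level_lookup (rank : Int) (out : List String) : Prop := out = level_lookup_alt rank
instance (rank : Int) (out : List String) : Decidable (Spec_level_lookup rank out) := by unfold Spec_level_lookup; infer_instance

-- ===== CLAIM (what is proved, stated in full; the proofs are below) =====
def Claim_equal_level_lookup : Prop := ∀ (rank : Int), Dom_level_lookup rank → Spec_level_lookup rank (level_lookup rank)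

-- ===== LEMMAS AND PROOFS =====
theorem pvPairs_pos : ∀ m : Nat, m < 60 → 1 ≤ (PySem.List.pyGetD pvPairs (m : Int) (0, "")).1 := by decide

theorem pvBisect_nonpos (rank : Int) (hr : rank ≤ 0) :
    ∀ (f lo hi : Nat), hi ≤ 60 → pvBisect rank f lo hi = lo := by
  intro f
  induction f with
  | zero => intro lo hi _; rfl
  | succ f ih =>
    intro lo hi h60
    rw [pvBisect]
    by_cases hlt : lo < hi
    · rw [if_pos hlt]
      have hmid : (lo + hi) / 2 < 60 := by omega
      have := pvPairs_pos ((lo + hi) / 2) hmid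
      rw [if_neg (by omega)]
      exact ih lo ((lo + hi) / 2) (by omega)
    · rw [if_neg hlt]

theorem alt_nonpos (rank : Int) (hr : rank < 0) : level_lookup_alt rank = level_lookup_alt 0 := by
  have h1 : ¬rank = 1 := by omega
  have h2 : ¬rank > 75 := by omega
  simp only [level_lookup_alt, if_neg h1, if_neg h2]
  rw [pvBisect_nonpos rank (by omega) _ _ _ (by decide)]
  rfl


theorem pvKey : ∀ i : Nat, i < 20 → ∀ j : Nat, j < 3 →
    1 ≤ PySem.List.pyGetD ((pvLevelData.get? (PySem.List.pyGetD pvLevelListV (i : Int) "")).getD []) (j : Int) 0 := by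
  decide

theorem pvLen : ∀ i : Nat, i < 20 →
    ((pvLevelData.get? (PySem.List.pyGetD pvLevelListV (i : Int) "")).getD []).length = 3 := by
  decide

theorem a_nonpos (rank : Int) (hr : rank < 0) : level_lookup rank = level_lookup 0 := by
  have h1 : ¬rank = 1 := by omega
  have h2 : ¬rank > 75 := by omega
  simp only [level_lookup, if_neg h1, if_neg h2,
    if_neg (show ¬(0:Int) = 1 by decide), if_neg (show ¬(0:Int) > 75 by decide)]
  rw [PySem.List.foldl_congr_mem (PySem.List.pyRange 0 (21 - 1)) _
      (fun lb_list i =>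
        List.foldl
          (fun lb_list j =>
            if PySem.List.pyGetD ((pvLevelData.get? (PySem.List.pyGetD pvLevelListV i "")).getD []) j 0 ≥ (0:Int) then
              lb_list ++ [(PySem.List.pyGetD pvLevelListV i "",
                PySem.List.pyGetD ((pvLevelData.get? (PySem.List.pyGetD pvLevelListV i "")).getD []) j 0)]
            else lb_list)
          lb_list (PySem.List.pyRange 0 ↑((pvLevelData.get? (PySem.List.pyGetD pvLevelListV i "")).getD []).length))
      [] ?_]
  intro acc i hi
  rw [PySem.List.mem_pyRange_one] at hi
  apply PySem.List.foldl_congr_mem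
  intro acc2 j hj
  rw [PySem.List.mem_pyRange_one] at hj
  obtain ⟨hi0, hi20⟩ := hi
  obtain ⟨hj0, hjlt⟩ := hj
  obtain ⟨n, rfl⟩ : ∃ n : Nat, i = (n : Int) := ⟨i.toNat, (Int.toNat_of_nonneg hi0).symm⟩
  obtain ⟨m, rfl⟩ : ∃ m : Nat, j = (m : Int) := ⟨j.toNat, (Int.toNat_of_nonneg hj0).symm⟩
  have hlen := pvLen n (by omega)
  have hkey := pvKey n (by omega) m (by rw [hlen] at hjlt; exact_mod_cast hjlt)
  rw [if_pos (by omega : PySem.List.pyGetD ((pvLevelData.get? (PySem.List.pyGetD pvLevelListV (n:Int) "")).getD []) (m:Int) 0 ≥ rank),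
      if_pos (by omega : PySem.List.pyGetD ((pvLevelData.get? (PySem.List.pyGetD pvLevelListV (n:Int) "")).getD []) (m:Int) 0 ≥ (0:Int))]


def pvThr : List Int := [1, 3, 7, 8, 9, 10, 11, 12, 13, 14, 16, 19, 20, 21, 23, 25, 27, 29, 31, 32,
  33, 34, 35, 36, 37, 39, 41, 42, 43, 45, 47, 49, 52, 54, 56, 57, 58, 60, 61, 62, 63, 64, 68, 70, 72, 74, 77, 79, 82, 85, 90]

theorem pvVmem : ∀ n : Nat, n < 20 → ∀ m : Nat, m < 3 →
    PySem.List.pyGetD ((pvLevelData.get? (PySem.List.pyGetD pvLevelListV (n : Int) "")).getD []) (m : Int) 0 ∈ pvThr := by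
  decide

theorem pvWmem : ∀ m : Nat, m < 60 → (PySem.List.pyGetD pvPairs (m : Int) (0, "")).1 ∈ pvThr := by
  decide

theorem a_between (a b r : Int) (ha : a < r) (hrb : r ≤ b)
    (h1r : ¬r = 1) (h1b : ¬b = 1) (h75r : ¬r > 75) (h75b : ¬b > 75)
    (hsep : ∀ t ∈ pvThr, b ≤ t ∨ t ≤ a) :
    level_lookup r = level_lookup b := by
  simp only [level_lookup, if_neg h1r, if_neg h75r, if_neg h1b, if_neg h75b]
  rw [PySem.List.foldl_congr_mem (PySem.List.pyRange 0 (21 - 1)) _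
      (fun lb_list i =>
        List.foldl
          (fun lb_list j =>
            if PySem.List.pyGetD ((pvLevelData.get? (PySem.List.pyGetD pvLevelListV i "")).getD []) j 0 ≥ b then
              lb_list ++ [(PySem.List.pyGetD pvLevelListV i "",
                PySem.List.pyGetD ((pvLevelData.get? (PySem.List.pyGetD pvLevelListV i "")).getD []) j 0)]
            else lb_list)
          lb_list (PySem.List.pyRange 0 ↑((pvLevelData.get? (PySem.List.pyGetD pvLevelListV i "")).getD []).length))
      [] ?_]
  intro acc i hi
  rw [PySem.List.mem_pyRange_one] at hi
  apply PySem.List.foldl_congr_mem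
  intro acc2 j hj
  rw [PySem.List.mem_pyRange_one] at hj
  obtain ⟨hi0, hi20⟩ := hi
  obtain ⟨hj0, hjlt⟩ := hj
  obtain ⟨n, rfl⟩ : ∃ n : Nat, i = (n : Int) := ⟨i.toNat, (Int.toNat_of_nonneg hi0).symm⟩
  obtain ⟨m, rfl⟩ : ∃ m : Nat, j = (m : Int) := ⟨j.toNat, (Int.toNat_of_nonneg hj0).symm⟩
  have hlen := pvLen n (by omega)
  have hmem := pvVmem n (by omega) m (by rw [hlen] at hjlt; exact_mod_cast hjlt)
  rcases hsep _ hmem with hbig | hsmall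
  · rw [if_pos (by omega : PySem.List.pyGetD ((pvLevelData.get? (PySem.List.pyGetD pvLevelListV (n:Int) "")).getD []) (m:Int) 0 ≥ r),
        if_pos (by omega : PySem.List.pyGetD ((pvLevelData.get? (PySem.List.pyGetD pvLevelListV (n:Int) "")).getD []) (m:Int) 0 ≥ b)]
  · rw [if_neg (by omega : ¬PySem.List.pyGetD ((pvLevelData.get? (PySem.List.pyGetD pvLevelListV (n:Int) "")).getD []) (m:Int) 0 ≥ r),
        if_neg (by omega : ¬PySem.List.pyGetD ((pvLevelData.get? (PySem.List.pyGetD pvLevelListV (n:Int) "")).getD []) (m:Int) 0 ≥ b)]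

theorem pvBisect_between (a b r : Int) (ha : a < r) (hrb : r ≤ b)
    (hsep : ∀ t ∈ pvThr, b ≤ t ∨ t ≤ a) :
    ∀ (f lo hi : Nat), hi ≤ 60 → pvBisect r f lo hi = pvBisect b f lo hi := by
  intro f
  induction f with
  | zero => intro lo hi _; rfl
  | succ f ih =>
    intro lo hi h60
    rw [pvBisect, pvBisect]
    by_cases hlt : lo < hi
    · rw [if_pos hlt, if_pos hlt]
      have hmid : (lo + hi) / 2 < 60 := by omega
      rcases hsep _ (pvWmem ((lo + hi) / 2) hmid) with hbig | hsmall
      · rw [if_neg (by omega), if_neg (by omega)]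
        exact ih lo ((lo + hi) / 2) (by omega)
      · rw [if_pos (by omega), if_pos (by omega)]
        exact ih ((lo + hi) / 2 + 1) hi (by omega)
    · rw [if_neg hlt, if_neg hlt]

theorem alt_between (a b r : Int) (ha : a < r) (hrb : r ≤ b)
    (h1r : ¬r = 1) (h1b : ¬b = 1) (h75r : ¬r > 75) (h75b : ¬b > 75)
    (hsep : ∀ t ∈ pvThr, b ≤ t ∨ t ≤ a) :
    level_lookup_alt r = level_lookup_alt b := by
  simp only [level_lookup_alt, if_neg h1r, if_neg h75r, if_neg h1b, if_neg h75b]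
  rw [pvBisect_between a b r ha hrb hsep _ _ _ (by decide)]


theorem a_gt75 (rank : Int) (h : rank > 75) : level_lookup rank = level_lookup_alt rank := by
  have h1 : ¬rank = 1 := by omega
  simp only [level_lookup, level_lookup_alt, if_neg h1, if_pos h]
  rfl

-- ===== VERDICT (by name: the statement is the Claim_ definition above) =====
theorem level_lookup_spec : Claim_equal_level_lookup := by
  intro rank _
  show level_lookup rank = level_lookup_alt rank
  by_cases h75 : rank > 75
  · exact a_gt75 rank h75
  by_cases hneg : rank < 0
  · rw [a_nonpos rank hneg, alt_nonpos rank hneg]; rfl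
  by_cases e0 : rank = 0
  · subst e0; rfl
  by_cases e1 : rank = 1
  · subst e1; rfl
  by_cases hb3 : rank ≤ 3
  · rw [a_between 1 3 rank (by omega) hb3 (by omega) (by decide) (by omega) (by decide) (by decide),
        alt_between 1 3 rank (by omega) hb3 (by omega) (by decide) (by omega) (by decide) (by decide)]
    rfl
  by_cases hb7 : rank ≤ 7
  · rw [a_between 3 7 rank (by omega) hb7 (by omega) (by decide) (by omega) (by decide) (by decide),
        alt_between 3 7 rank (by omega) hb7 (by omega) (by decide) (by omega) (by decide) (by decide)]
    rfl
  by_cases hb8 : rank ≤ 8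
  · rw [a_between 7 8 rank (by omega) hb8 (by omega) (by decide) (by omega) (by decide) (by decide),
        alt_between 7 8 rank (by omega) hb8 (by omega) (by decide) (by omega) (by decide) (by decide)]
    rfl
  by_cases hb9 : rank ≤ 9
  · rw [a_between 8 9 rank (by omega) hb9 (by omega) (by decide) (by omega) (by decide) (by decide),
        alt_between 8 9 rank (by omega) hb9 (by omega) (by decide) (by omega) (by decide) (by decide)]
    rfl
  by_cases hb10 : rank ≤ 10
  · rw [a_between 9 10 rank (by omega) hb10 (by omega) (by decide) (by omega) (by decide) (by decide),
        alt_between 9 10 rank (by omega) hb10 (by omega) (by decide) (by omega) (by decide) (by decide)]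
    rfl
  by_cases hb11 : rank ≤ 11
  · rw [a_between 10 11 rank (by omega) hb11 (by omega) (by decide) (by omega) (by decide) (by decide),
        alt_between 10 11 rank (by omega) hb11 (by omega) (by decide) (by omega) (by decide) (by decide)]
    rfl
  by_cases hb12 : rank ≤ 12
  · rw [a_between 11 12 rank (by omega) hb12 (by omega) (by decide) (by omega) (by decide) (by decide),
        alt_between 11 12 rank (by omega) hb12 (by omega) (by decide) (by omega) (by decide) (by decide)]
    rfl
  by_cases hb13 : rank ≤ 13
  · rw [a_between 12 13 rank (by omega) hb13 (by omega) (by decide) (by omega) (by decide) (by decide),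
        alt_between 12 13 rank (by omega) hb13 (by omega) (by decide) (by omega) (by decide) (by decide)]
    rfl
  by_cases hb14 : rank ≤ 14
  · rw [a_between 13 14 rank (by omega) hb14 (by omega) (by decide) (by omega) (by decide) (by decide),
        alt_between 13 14 rank (by omega) hb14 (by omega) (by decide) (by omega) (by decide) (by decide)]
    rfl
  by_cases hb16 : rank ≤ 16
  · rw [a_between 14 16 rank (by omega) hb16 (by omega) (by decide) (by omega) (by decide) (by decide),
        alt_between 14 16 rank (by omega) hb16 (by omega) (by decide) (by omega) (by decide) (by decide)]
    rfl
  by_cases hb19 : rank ≤ 19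
  · rw [a_between 16 19 rank (by omega) hb19 (by omega) (by decide) (by omega) (by decide) (by decide),
        alt_between 16 19 rank (by omega) hb19 (by omega) (by decide) (by omega) (by decide) (by decide)]
    rfl
  by_cases hb20 : rank ≤ 20
  · rw [a_between 19 20 rank (by omega) hb20 (by omega) (by decide) (by omega) (by decide) (by decide),
        alt_between 19 20 rank (by omega) hb20 (by omega) (by decide) (by omega) (by decide) (by decide)]
    rfl
  by_cases hb21 : rank ≤ 21
  · rw [a_between 20 21 rank (by omega) hb21 (by omega) (by decide) (by omega) (by decide) (by decide),
        alt_between 20 21 rank (by omega) hb21 (by omega) (by decide) (by omega) (by decide) (by decide)]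
    rfl
  by_cases hb23 : rank ≤ 23
  · rw [a_between 21 23 rank (by omega) hb23 (by omega) (by decide) (by omega) (by decide) (by decide),
        alt_between 21 23 rank (by omega) hb23 (by omega) (by decide) (by omega) (by decide) (by decide)]
    rfl
  by_cases hb25 : rank ≤ 25
  · rw [a_between 23 25 rank (by omega) hb25 (by omega) (by decide) (by omega) (by decide) (by decide),
        alt_between 23 25 rank (by omega) hb25 (by omega) (by decide) (by omega) (by decide) (by decide)]
    rfl
  by_cases hb27 : rank ≤ 27
  · rw [a_between 25 27 rank (by omega) hb27 (by omega) (by decide) (by omega) (by decide) (by decide),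
        alt_between 25 27 rank (by omega) hb27 (by omega) (by decide) (by omega) (by decide) (by decide)]
    rfl
  by_cases hb29 : rank ≤ 29
  · rw [a_between 27 29 rank (by omega) hb29 (by omega) (by decide) (by omega) (by decide) (by decide),
        alt_between 27 29 rank (by omega) hb29 (by omega) (by decide) (by omega) (by decide) (by decide)]
    rfl
  by_cases hb31 : rank ≤ 31
  · rw [a_between 29 31 rank (by omega) hb31 (by omega) (by decide) (by omega) (by decide) (by decide),
        alt_between 29 31 rank (by omega) hb31 (by omega) (by decide) (by omega) (by decide) (by decide)]
    rfl
  by_cases hb32 : rank ≤ 32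
  · rw [a_between 31 32 rank (by omega) hb32 (by omega) (by decide) (by omega) (by decide) (by decide),
        alt_between 31 32 rank (by omega) hb32 (by omega) (by decide) (by omega) (by decide) (by decide)]
    rfl
  by_cases hb33 : rank ≤ 33
  · rw [a_between 32 33 rank (by omega) hb33 (by omega) (by decide) (by omega) (by decide) (by decide),
        alt_between 32 33 rank (by omega) hb33 (by omega) (by decide) (by omega) (by decide) (by decide)]
    rfl
  by_cases hb34 : rank ≤ 34
  · rw [a_between 33 34 rank (by omega) hb34 (by omega) (by decide) (by omega) (by decide) (by decide),
        alt_between 33 34 rank (by omega) hb34 (by omega) (by decide) (by omega) (by decide) (by decide)]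
    rfl
  by_cases hb35 : rank ≤ 35
  · rw [a_between 34 35 rank (by omega) hb35 (by omega) (by decide) (by omega) (by decide) (by decide),
        alt_between 34 35 rank (by omega) hb35 (by omega) (by decide) (by omega) (by decide) (by decide)]
    rfl
  by_cases hb36 : rank ≤ 36
  · rw [a_between 35 36 rank (by omega) hb36 (by omega) (by decide) (by omega) (by decide) (by decide),
        alt_between 35 36 rank (by omega) hb36 (by omega) (by decide) (by omega) (by decide) (by decide)]
    rfl
  by_cases hb37 : rank ≤ 37
  · rw [a_between 36 37 rank (by omega) hb37 (by omega) (by decide) (by omega) (by decide) (by decide),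
        alt_between 36 37 rank (by omega) hb37 (by omega) (by decide) (by omega) (by decide) (by decide)]
    rfl
  by_cases hb39 : rank ≤ 39
  · rw [a_between 37 39 rank (by omega) hb39 (by omega) (by decide) (by omega) (by decide) (by decide),
        alt_between 37 39 rank (by omega) hb39 (by omega) (by decide) (by omega) (by decide) (by decide)]
    rfl
  by_cases hb41 : rank ≤ 41
  · rw [a_between 39 41 rank (by omega) hb41 (by omega) (by decide) (by omega) (by decide) (by decide),
        alt_between 39 41 rank (by omega) hb41 (by omega) (by decide) (by omega) (by decide) (by decide)]
    rfl
  by_cases hb42 : rank ≤ 42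
  · rw [a_between 41 42 rank (by omega) hb42 (by omega) (by decide) (by omega) (by decide) (by decide),
        alt_between 41 42 rank (by omega) hb42 (by omega) (by decide) (by omega) (by decide) (by decide)]
    rfl
  by_cases hb43 : rank ≤ 43
  · rw [a_between 42 43 rank (by omega) hb43 (by omega) (by decide) (by omega) (by decide) (by decide),
        alt_between 42 43 rank (by omega) hb43 (by omega) (by decide) (by omega) (by decide) (by decide)]
    rfl
  by_cases hb45 : rank ≤ 45
  · rw [a_between 43 45 rank (by omega) hb45 (by omega) (by decide) (by omega) (by decide) (by decide),
        alt_between 43 45 rank (by omega) hb45 (by omega) (by decide) (by omega) (by decide) (by decide)]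
    rfl
  by_cases hb47 : rank ≤ 47
  · rw [a_between 45 47 rank (by omega) hb47 (by omega) (by decide) (by omega) (by decide) (by decide),
        alt_between 45 47 rank (by omega) hb47 (by omega) (by decide) (by omega) (by decide) (by decide)]
    rfl
  by_cases hb49 : rank ≤ 49
  · rw [a_between 47 49 rank (by omega) hb49 (by omega) (by decide) (by omega) (by decide) (by decide),
        alt_between 47 49 rank (by omega) hb49 (by omega) (by decide) (by omega) (by decide) (by decide)]
    rfl
  by_cases hb52 : rank ≤ 52
  · rw [a_between 49 52 rank (by omega) hb52 (by omega) (by decide) (by omega) (by decide) (by decide),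
        alt_between 49 52 rank (by omega) hb52 (by omega) (by decide) (by omega) (by decide) (by decide)]
    rfl
  by_cases hb54 : rank ≤ 54
  · rw [a_between 52 54 rank (by omega) hb54 (by omega) (by decide) (by omega) (by decide) (by decide),
        alt_between 52 54 rank (by omega) hb54 (by omega) (by decide) (by omega) (by decide) (by decide)]
    rfl
  by_cases hb56 : rank ≤ 56
  · rw [a_between 54 56 rank (by omega) hb56 (by omega) (by decide) (by omega) (by decide) (by decide),
        alt_between 54 56 rank (by omega) hb56 (by omega) (by decide) (by omega) (by decide) (by decide)]
    rfl
  by_cases hb57 : rank ≤ 57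
  · rw [a_between 56 57 rank (by omega) hb57 (by omega) (by decide) (by omega) (by decide) (by decide),
        alt_between 56 57 rank (by omega) hb57 (by omega) (by decide) (by omega) (by decide) (by decide)]
    rfl
  by_cases hb58 : rank ≤ 58
  · rw [a_between 57 58 rank (by omega) hb58 (by omega) (by decide) (by omega) (by decide) (by decide),
        alt_between 57 58 rank (by omega) hb58 (by omega) (by decide) (by omega) (by decide) (by decide)]
    rfl
  by_cases hb60 : rank ≤ 60
  · rw [a_between 58 60 rank (by omega) hb60 (by omega) (by decide) (by omega) (by decide) (by decide),
        alt_between 58 60 rank (by omega) hb60 (by omega) (by decide) (by omega) (by decide) (by decide)]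
    rfl
  by_cases hb61 : rank ≤ 61
  · rw [a_between 60 61 rank (by omega) hb61 (by omega) (by decide) (by omega) (by decide) (by decide),
        alt_between 60 61 rank (by omega) hb61 (by omega) (by decide) (by omega) (by decide) (by decide)]
    rfl
  by_cases hb62 : rank ≤ 62
  · rw [a_between 61 62 rank (by omega) hb62 (by omega) (by decide) (by omega) (by decide) (by decide),
        alt_between 61 62 rank (by omega) hb62 (by omega) (by decide) (by omega) (by decide) (by decide)]
    rfl
  by_cases hb63 : rank ≤ 63
  · rw [a_between 62 63 rank (by omega) hb63 (by omega) (by decide) (by omega) (by decide) (by decide),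
        alt_between 62 63 rank (by omega) hb63 (by omega) (by decide) (by omega) (by decide) (by decide)]
    rfl
  by_cases hb64 : rank ≤ 64
  · rw [a_between 63 64 rank (by omega) hb64 (by omega) (by decide) (by omega) (by decide) (by decide),
        alt_between 63 64 rank (by omega) hb64 (by omega) (by decide) (by omega) (by decide) (by decide)]
    rfl
  by_cases hb68 : rank ≤ 68
  · rw [a_between 64 68 rank (by omega) hb68 (by omega) (by decide) (by omega) (by decide) (by decide),
        alt_between 64 68 rank (by omega) hb68 (by omega) (by decide) (by omega) (by decide) (by decide)]
    rfl
  by_cases hb70 : rank ≤ 70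
  · rw [a_between 68 70 rank (by omega) hb70 (by omega) (by decide) (by omega) (by decide) (by decide),
        alt_between 68 70 rank (by omega) hb70 (by omega) (by decide) (by omega) (by decide) (by decide)]
    rfl
  by_cases hb72 : rank ≤ 72
  · rw [a_between 70 72 rank (by omega) hb72 (by omega) (by decide) (by omega) (by decide) (by decide),
        alt_between 70 72 rank (by omega) hb72 (by omega) (by decide) (by omega) (by decide) (by decide)]
    rfl
  by_cases hb74 : rank ≤ 74
  · rw [a_between 72 74 rank (by omega) hb74 (by omega) (by decide) (by omega) (by decide) (by decide),
        alt_between 72 74 rank (by omega) hb74 (by omega) (by decide) (by omega) (by decide) (by decide)]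
    rfl
  have hb75 : rank ≤ 75 := by omega
  rw [a_between 74 75 rank (by omega) hb75 (by omega) (by decide) (by omega) (by decide) (by decide),
      alt_between 74 75 rank (by omega) hb75 (by omega) (by decide) (by omega) (by decide) (by decide)]
  rfl
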